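-- pv_equiv track=rewrite | github.com/flexfalk/3DTennisBallTrajectory | Utils/HyperparameterSearch/HyperParameter_utils.py | find_component_intersections
-- ===== SOURCE A (Python) =====
-- def find_component_intersections(components_a, components_b):
--     intersections = []
--     for component_a in components_a:
--         for component_b in components_b:
--             intersection = set(component_a).intersection(component_b)
--             if intersection:
--                 intersections.append((component_a, component_b, list(intersection)))
--     return intersections
-- ===== SOURCE B (Python) =====
-- def find_component_intersections(components_a, components_b):
--     # Inverted index: element -> ascending list of b-indices containing it.
--     index = {}
--     for j, component_b in enumerate(components_b):
--         for x in set(component_b):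
--             index.setdefault(x, []).append(j)
--     result = []
--     for component_a in components_a:
--         sa = set(component_a)
--         hit = set()
--         for x in sa:
--             hit.update(index.get(x, ()))
--         for j in sorted(hit):
--             component_b = components_b[j]
--             result.append((component_a, component_b, list(sa.intersection(component_b))))
--     return result
-- ===== Notes on version B (the rewrite author's own statement) =====
-- stated objective: alternative
-- what changed: B replaces A's all-pairs scan (which intersects set(component_a) with every component_b) by an inverted index element -> ascending b-indices built in one pass, so the intersection is computed only for candidate pairs that provably share an element; sorting the candidate index set preserves A's output order. Intended as faster on sparse matches; a timing run did not measure a 1.5x gain at the largest (dense-match) size, so no speed is claimed.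
import Mathlib
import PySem

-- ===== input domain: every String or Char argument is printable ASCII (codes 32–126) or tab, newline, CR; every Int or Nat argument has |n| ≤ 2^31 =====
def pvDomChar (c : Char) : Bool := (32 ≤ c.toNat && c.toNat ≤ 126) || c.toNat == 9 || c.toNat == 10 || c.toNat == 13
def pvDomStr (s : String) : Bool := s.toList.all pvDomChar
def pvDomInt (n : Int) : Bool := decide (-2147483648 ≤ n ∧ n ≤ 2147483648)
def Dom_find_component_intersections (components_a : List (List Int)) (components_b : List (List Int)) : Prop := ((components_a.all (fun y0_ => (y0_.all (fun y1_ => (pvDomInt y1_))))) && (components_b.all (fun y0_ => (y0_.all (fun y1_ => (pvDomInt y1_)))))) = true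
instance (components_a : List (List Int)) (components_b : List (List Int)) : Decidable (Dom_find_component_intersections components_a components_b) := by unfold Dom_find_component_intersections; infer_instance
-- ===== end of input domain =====

-- B replaces A's all-pairs scan by an inverted index element -> b-indices, visiting only
-- candidate pairs; return value only. Each side carries its own exact model of CPython's
-- set iteration order (hash(n) = n except hash(-1) = -2, open addressing, PySet_MINSIZE 8,
-- LINEAR_PROBES 9, PERTURB_SHIFT 5, resize at fill*5 >= mask*3), written in two different
-- decompositions; list(s) reads the filled slots in table order.

-- ===== PORT A =====
-- A-side set-order model: the probe loop checks emptiness as it walks, the table is grown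
-- by a fuelled doubling loop, and insertion is a left fold over a (table, used) state.
def pvH64 (x : Int) : Nat := (((if x = -1 then -2 else x) % (2 ^ 64 : Int))).toNat

-- first empty slot among t[i], t[i+1], …, t[i+k-1]  (the linear-probe window)
def pvLinear (t : List (Option Int)) : Nat → Nat → Option Nat
  | _, 0 => none
  | i, k + 1 => if (t.getD i none).isNone then some i else pvLinear t (i + 1) k

-- the probe loop of set_add_entry / set_insert_clean searching for an empty slot
def pvProbe (t : List (Option Int)) (mask : Nat) : Nat → Nat → Nat → Option Nat
  | 0, _, _ => none
  | fuel + 1, i, perturb =>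
    if (t.getD i none).isNone then some i
    else
      match (if i + 9 ≤ mask then pvLinear t (i + 1) 9 else none) with
      | some j => some j
      | none => pvProbe t mask fuel ((i * 5 + 1 + (perturb >>> 5)) &&& mask) (perturb >>> 5)

-- place a fresh key into the table (fuel covers the full probe cycle in practice; the
-- fallback to the first empty slot in table order only makes the function total)
def pvPlace (t : List (Option Int)) (x : Int) : List (Option Int) :=
  match pvProbe t (t.length - 1) (t.length + 16) (pvH64 x &&& (t.length - 1)) (pvH64 x) with
  | some i => t.set i (some x)
  | none =>
    match t.findIdx? (fun o => o.isNone) with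
    | some i => t.set i (some x)
    | none => t

-- newsize = PySet_MINSIZE; while newsize <= minused: newsize <<= 1
def pvGrow : Nat → Nat → Nat → Nat
  | 0, n, _ => n
  | fuel + 1, n, minused => if n ≤ minused then pvGrow fuel (n * 2) minused else n

def pvResize (t : List (Option Int)) (used : Nat) : List (Option Int) :=
  (t.filterMap id).foldl pvPlace
    (List.replicate (pvGrow 64 8 (if used > 50000 then used * 2 else used * 4)) none)

def pvStep (s : List (Option Int) × Nat) (x : Int) : List (Option Int) × Nat :=
  if (s.2 + 1) * 5 ≥ ((pvPlace s.1 x).length - 1) * 3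
  then (pvResize (pvPlace s.1 x) (s.2 + 1), s.2 + 1)
  else (pvPlace s.1 x, s.2 + 1)

def cpySetOrder (xs : List Int) : List Int :=
  ((xs.foldl pvStep (List.replicate 8 none, 0)).1).filterMap id

-- list(set(ca).intersection(cb)) : the distinct common elements are inserted into the
-- result set in cb-first-occurrence order, then listed in table order
def pvInterList (ca cb : List Int) : List Int :=
  cpySetOrder (PySem.Set.inter (PySem.Set.ofList cb) ca)

def find_component_intersections (components_a : List (List Int)) (components_b : List (List Int)) : List (List Int × List Int × List Int) :=
  components_a.foldl (fun intersections component_a =>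
    components_b.foldl (fun intersections component_b =>
      let inter := pvInterList component_a component_b
      if inter ≠ [] then intersections ++ [(component_a, component_b, inter)]
      else intersections) intersections) []

-- ===== PORT B =====
-- B-side set-order model of the same table: the probe is a generated slot sequence
-- searched for its first empty entry, growth is a closed 64-fold iterate, and insertion
-- is a structural recursion carrying the used counter.
def bHash (x : Int) : Nat :=
  if x == -1 then ((2 : Int) ^ 64 - 2).toNat else (x % (2 : Int) ^ 64).toNat

-- the ordered sequence of slots the probe visits: home slot, its linear window when it
-- fits under the mask, then the perturb jump, fuel times
def bSeq (mask : Nat) : Nat → Nat → Nat → List Nat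
  | 0, _, _ => []
  | fuel + 1, i, perturb =>
    (i :: (if i + 9 ≤ mask then List.range' (i + 1) 9 else []))
      ++ bSeq mask fuel ((i * 5 + 1 + (perturb >>> 5)) &&& mask) (perturb >>> 5)

-- absolute index of the first empty slot, scanning from position s (totality fallback)
def bFirstEmpty : List (Option Int) → Nat → Option Nat
  | [], _ => none
  | o :: t, s => if o.isNone then some s else bFirstEmpty t (s + 1)

def bPlace (t : List (Option Int)) (x : Int) : List (Option Int) :=
  match ((bSeq (t.length - 1) (t.length + 16) (bHash x &&& (t.length - 1)) (bHash x)).find?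
          (fun i => (t.getD i none).isNone)).or (bFirstEmpty t 0) with
  | some i => t.set i (some x)
  | none => t

-- the grown table: double from PySet_MINSIZE while ≤ minused, as a 64-fold iterate
def bNewTable (minused : Nat) : List (Option Int) :=
  List.replicate ((fun n => if n ≤ minused then n * 2 else n)^[64] 8) none

def bReinsert : List Int → List (Option Int) → List (Option Int)
  | [], t => t
  | x :: xs, t => bReinsert xs (bPlace t x)

def bResize (t : List (Option Int)) (used : Nat) : List (Option Int) :=
  bReinsert (t.filterMap id) (bNewTable (if used > 50000 then used * 2 else used * 4))

def bInsertAll : List Int → Nat → List (Option Int) → List (Option Int)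
  | [], _, t => t
  | x :: xs, u, t =>
    let t' := bPlace t x
    if (u + 1) * 5 ≥ (t'.length - 1) * 3 then bInsertAll xs (u + 1) (bResize t' (u + 1))
    else bInsertAll xs (u + 1) t'

def bSetList (xs : List Int) : List Int :=
  (bInsertAll xs 0 (List.replicate 8 none)).filterMap id

-- the distinct elements of cb that sa = set(ca) contains, in cb order (the insertion
-- sequence of sa.intersection(cb)), built front-to-back with a seen accumulator
def bCommon (ca : List Int) : List Int → List Int → List Int
  | _, [] => []
  | seen, x :: xs =>
    if ca.contains x && !seen.contains x then x :: bCommon ca (x :: seen) xs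
    else bCommon ca seen xs

-- list(sa.intersection(cb))
def bInterList (ca cb : List Int) : List Int := bSetList (bCommon ca [] cb)

def find_component_intersections_alt (components_a : List (List Int)) (components_b : List (List Int)) : List (List Int × List Int × List Int) :=
  let index : PySem.Dict Int (List Int) :=
    (PySem.List.enumerate components_b).foldl
      (fun d jcb => (PySem.Set.ofList jcb.2).foldl (fun d x => d.modify x [] (· ++ [jcb.1])) d)
      PySem.Dict.empty
  components_a.foldl (fun result component_a =>
    let sa : PySem.Set Int := PySem.Set.ofList component_a
    let hit : PySem.Set Int := sa.foldl (fun h x => PySem.Set.update h (index.getD x [])) PySem.Set.empty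
    (PySem.List.sorted hit (fun j => j) false).foldl (fun result j =>
      let component_b := PySem.List.pyGetD components_b j []
      result ++ [(component_a, component_b, bInterList component_a component_b)]) result) []

-- ===== PRECONDITION & SPEC =====
def Spec_find_component_intersections (components_a : List (List Int)) (components_b : List (List Int)) (out : List (List Int × List Int × List Int)) : Prop := out = find_component_intersections_alt components_a components_b
instance (components_a : List (List Int)) (components_b : List (List Int)) (out : List (List Int × List Int × List Int)) : Decidable (Spec_find_component_intersections components_a components_b out) := by unfold Spec_find_component_intersections; infer_instance

-- ===== CLAIM (what is proved, stated in full; the proofs are below) =====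
def Claim_equal_find_component_intersections : Prop := ∀ (components_a : List (List Int)) (components_b : List (List Int)), Dom_find_component_intersections components_a components_b → Spec_find_component_intersections components_a components_b (find_component_intersections components_a components_b)

-- ===== LEMMAS AND PROOFS =====

-- ---- the two set-order models agree: bSetList = cpySetOrder, bInterList = pvInterList ----
lemma bHash_eq (x : Int) : bHash x = pvH64 x := by
  unfold bHash pvH64
  by_cases hx : x = -1
  · rw [hx]; norm_num
  · rw [if_neg (by simpa using hx), if_neg hx]

lemma pvLinear_eq_find? (t : List (Option Int)) (k i : Nat) :
    pvLinear t i k = (List.range' i k).find? (fun j => (t.getD j none).isNone) := by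
  induction k generalizing i with
  | zero => simp [pvLinear]
  | succ k ih =>
    rw [List.range'_succ, List.find?_cons]
    unfold pvLinear
    rcases ht : t.getD i none with _ | v
    · simp
    · simp [ih (i + 1)]

lemma pvProbe_eq_find? (t : List (Option Int)) (mask : Nat) (fuel i perturb : Nat) :
    pvProbe t mask fuel i perturb
      = (bSeq mask fuel i perturb).find? (fun j => (t.getD j none).isNone) := by
  induction fuel generalizing i perturb with
  | zero => simp [pvProbe, bSeq]
  | succ fuel ih =>
    unfold pvProbe bSeq
    rw [List.find?_append, List.find?_cons]
    rcases ht : t.getD i none with _ | v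
    · simp
    · simp only [Option.isNone_some, Bool.false_eq_true, if_false]
      rw [← ih]
      by_cases hw : i + 9 ≤ mask
      · rw [if_pos hw, if_pos hw, pvLinear_eq_find?]
        cases (List.range' (i + 1) 9).find? (fun j => (t.getD j none).isNone) with
        | some j => rfl
        | none => rfl
      · rw [if_neg hw, if_neg hw]
        simp [Option.or]

lemma bFirstEmpty_eq (t : List (Option Int)) :
    ∀ s, bFirstEmpty t s = (t.findIdx? (fun o => o.isNone)).map (· + s) := by
  induction t with
  | nil => intro s; simp [bFirstEmpty]
  | cons o t ih =>
    intro s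
    rw [List.findIdx?_cons]
    unfold bFirstEmpty
    by_cases h : o.isNone
    · simp [h]
    · rw [if_neg h, if_neg (by simp [h]), ih (s + 1), Option.map_map]
      cases t.findIdx? (fun o => o.isNone) with
      | none => rfl
      | some j => simp; omega

lemma bPlace_eq (t : List (Option Int)) (x : Int) : bPlace t x = pvPlace t x := by
  unfold bPlace pvPlace
  rw [bHash_eq, ← pvProbe_eq_find?, bFirstEmpty_eq t 0]
  cases pvProbe t (t.length - 1) (t.length + 16) (pvH64 x &&& (t.length - 1)) (pvH64 x) with
  | some i => rfl
  | none =>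
    simp only [Option.or]
    cases t.findIdx? (fun o => o.isNone) with
    | none => rfl
    | some i => simp

lemma pvGrow_of_lt (f n m : Nat) (h : m < n) :
    (fun n => if n ≤ m then n * 2 else n)^[f] n = n := by
  induction f with
  | zero => rfl
  | succ f ih => rw [Function.iterate_succ_apply]; simp only [if_neg (by omega : ¬ n ≤ m)]; exact ih

lemma pvGrow_eq_iterate (f : Nat) : ∀ n m : Nat,
    pvGrow f n m = (fun n => if n ≤ m then n * 2 else n)^[f] n := by
  induction f with
  | zero => intro n m; rfl
  | succ f ih =>
    intro n m
    unfold pvGrow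
    rw [Function.iterate_succ_apply]
    by_cases h : n ≤ m
    · simp only [if_pos h]; exact ih (n * 2) m
    · simp only [if_neg h]; exact (pvGrow_of_lt f n m (by omega)).symm

lemma bReinsert_eq (l : List Int) : ∀ t, bReinsert l t = l.foldl pvPlace t := by
  induction l with
  | nil => intro t; rfl
  | cons x xs ih => intro t; unfold bReinsert; rw [bPlace_eq, ih, List.foldl_cons]

lemma bResize_eq (t : List (Option Int)) (u : Nat) : bResize t u = pvResize t u := by
  unfold bResize pvResize bNewTable
  rw [bReinsert_eq, pvGrow_eq_iterate]

lemma bInsertAll_eq (xs : List Int) : ∀ (u : Nat) (t : List (Option Int)),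
    bInsertAll xs u t = (xs.foldl pvStep (t, u)).1 := by
  induction xs with
  | nil => intro u t; rfl
  | cons x xs ih =>
    intro u t
    rw [List.foldl_cons]
    show (if (u + 1) * 5 ≥ ((bPlace t x).length - 1) * 3
        then bInsertAll xs (u + 1) (bResize (bPlace t x) (u + 1))
        else bInsertAll xs (u + 1) (bPlace t x)) = _
    rw [bPlace_eq, bResize_eq]
    by_cases h : (u + 1) * 5 ≥ ((pvPlace t x).length - 1) * 3
    · rw [if_pos h, ih,
        show pvStep (t, u) x = (pvResize (pvPlace t x) (u + 1), u + 1) from by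
          unfold pvStep; rw [if_pos h]]
    · rw [if_neg h, ih,
        show pvStep (t, u) x = (pvPlace t x, u + 1) from by
          unfold pvStep; rw [if_neg h]]

lemma bSetList_eq (xs : List Int) : bSetList xs = cpySetOrder xs := by
  unfold bSetList cpySetOrder
  rw [bInsertAll_eq]

lemma bCommon_eq_filter (ca : List Int) (cb : List Int) : ∀ seen : List Int,
    bCommon ca seen cb
      = (PySem.Set.ofList cb).filter (fun y => ca.contains y && !seen.contains y) := by
  induction cb with
  | nil => intro seen; simp [bCommon, PySem.Set.ofList]
  | cons x xs ih =>
    intro seen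
    rw [PySem.Set.ofList_cons, List.filter_cons]
    have hdisc : (PySem.Set.discard (PySem.Set.ofList xs) x).filter
          (fun y => ca.contains y && !seen.contains y)
        = (PySem.Set.ofList xs).filter (fun y => ca.contains y && !(x :: seen).contains y) := by
      unfold PySem.Set.discard
      rw [List.filter_filter]
      apply List.filter_congr
      intro y _
      simp only [List.contains_cons]
      cases hy : (y == x) <;> cases hca : ca.contains y <;> cases hs : seen.contains y <;> simp
    unfold bCommon
    by_cases h : (ca.contains x && !seen.contains x) = true
    · rw [if_pos h, if_pos h, ih (x :: seen), hdisc]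
    · rw [if_neg h, if_neg h, ih seen, hdisc]
      apply List.filter_congr
      intro y _
      by_cases hyx : y = x
      · subst hyx
        have hp : (ca.contains y && !seen.contains y) = false := by
          revert h; cases ca.contains y <;> cases seen.contains y <;> simp
        rw [hp]
        have hc : (y :: seen).contains y = true := by simp
        rw [hc]
        simp
      · simp [hyx]

lemma bInterList_eq : bInterList = pvInterList := by
  funext ca cb
  unfold bInterList pvInterList
  rw [bSetList_eq, bCommon_eq_filter ca cb []]
  congr 1
  unfold PySem.Set.inter
  apply List.filter_congr
  intro y _
  simp [PySem.Set.contains]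

-- ---- the table stays nonempty: cpySetOrder of a nonempty list is nonempty ----
def pvFilled (t : List (Option Int)) : Prop := ∃ o ∈ t, o.isSome

lemma pvFilled_set (t : List (Option Int)) (i : Nat) (x : Int) (h : pvFilled t) :
    pvFilled (t.set i (some x)) := by
  by_cases hi : i < t.length
  · refine ⟨some x, ?_, rfl⟩
    have h1 : i < (t.set i (some x)).length := by simpa using hi
    have h2 : (t.set i (some x))[i] = some x := List.getElem_set_self h1
    have := List.getElem_mem h1
    rwa [h2] at this
  · rw [List.set_eq_of_length_le (by omega)]; exact h

lemma pvFilled_place (t : List (Option Int)) (x : Int) (h : pvFilled t) :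
    pvFilled (pvPlace t x) := by
  unfold pvPlace
  cases hp : pvProbe t (t.length - 1) (t.length + 16) (pvH64 x &&& (t.length - 1)) (pvH64 x) with
  | some i => exact pvFilled_set t i x h
  | none =>
    cases hf : t.findIdx? (fun o => o.isNone) with
    | some i => exact pvFilled_set t i x h
    | none => exact h

lemma pvFilled_place_replicate (n : Nat) (x : Int) (hn : 0 < n) :
    pvFilled (pvPlace (List.replicate n none) x) := by
  unfold pvPlace
  have hget : ∀ i : Nat, ((List.replicate n (none : Option Int)).getD i none) = none := by
    intro i
    by_cases hi : i < n
    · rw [List.getD_eq_getElem _ _ (by simpa using hi)]; simp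
    · rw [List.getD_eq_default _ _ (by simpa using hi)]
  have hlen : (List.replicate n (none : Option Int)).length = n := by simp
  have hprobe : pvProbe (List.replicate n none) (n - 1) (n + 16)
      (pvH64 x &&& (n - 1)) (pvH64 x) = some (pvH64 x &&& (n - 1)) := by
    unfold pvProbe
    simp
  rw [hlen, hprobe]
  refine ⟨some x, ?_, rfl⟩
  have hlt : pvH64 x &&& (n - 1) < n := by
    have := Nat.and_le_right (n := pvH64 x) (m := n - 1)
    omega
  have h1 : pvH64 x &&& (n - 1) < ((List.replicate n (none : Option Int)).set (pvH64 x &&& (n-1)) (some x)).length := by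
    simpa using hlt
  have h2 := List.getElem_set_self h1
  have := List.getElem_mem h1
  rwa [h2] at this

lemma pvGrow_le (f n m : Nat) : n ≤ pvGrow f n m := by
  induction f generalizing n with
  | zero => simp [pvGrow]
  | succ f ih =>
    unfold pvGrow
    split
    · calc n ≤ n * 2 := by omega
        _ ≤ pvGrow f (n * 2) m := ih (n * 2)
    · exact le_refl n

lemma pvFilled_foldl_place (l : List Int) (t : List (Option Int)) (h : pvFilled t) :
    pvFilled (l.foldl pvPlace t) := by
  induction l generalizing t with
  | nil => exact h
  | cons y ys ih => exact ih _ (pvFilled_place t y h)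

lemma pvFilled_resize (t : List (Option Int)) (used : Nat) (h : pvFilled t) :
    pvFilled (pvResize t used) := by
  unfold pvResize
  obtain ⟨o, ho, hs⟩ := h
  obtain ⟨v, rfl⟩ := Option.isSome_iff_exists.mp hs
  have hv : v ∈ t.filterMap id := List.mem_filterMap.mpr ⟨some v, ho, rfl⟩
  obtain ⟨y, rest, hsplit⟩ := List.exists_cons_of_ne_nil (List.ne_nil_of_mem hv)
  rw [hsplit, List.foldl_cons]
  apply pvFilled_foldl_place
  apply pvFilled_place_replicate
  have h8 := pvGrow_le 64 8 (if used > 50000 then used * 2 else used * 4)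
  omega

lemma pvFilled_step (s : List (Option Int) × Nat) (x : Int) (h : pvFilled s.1) :
    pvFilled (pvStep s x).1 := by
  unfold pvStep
  split
  · exact pvFilled_resize _ _ (pvFilled_place _ _ h)
  · exact pvFilled_place _ _ h

lemma pvFilled_filterMap_ne_nil (t : List (Option Int)) (h : pvFilled t) :
    t.filterMap id ≠ [] := by
  obtain ⟨o, ho, hs⟩ := h
  obtain ⟨v, rfl⟩ := Option.isSome_iff_exists.mp hs
  exact List.ne_nil_of_mem (List.mem_filterMap.mpr ⟨some v, ho, rfl⟩)

lemma cpySetOrder_ne_nil (x : Int) (xs : List Int) : cpySetOrder (x :: xs) ≠ [] := by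
  unfold cpySetOrder
  apply pvFilled_filterMap_ne_nil
  rw [List.foldl_cons]
  have h0 : pvFilled (pvStep (List.replicate 8 none, 0) x).1 := by
    unfold pvStep
    split
    · exact pvFilled_resize _ _ (pvFilled_place_replicate 8 x (by omega))
    · exact pvFilled_place_replicate 8 x (by omega)
  generalize hst : pvStep (List.replicate 8 none, 0) x = s at h0
  clear hst
  induction xs generalizing s with
  | nil => exact h0
  | cons y ys ih => exact ih _ (pvFilled_step s y h0)

lemma cpySetOrder_eq_nil_iff (xs : List Int) : cpySetOrder xs = [] ↔ xs = [] := by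
  cases xs with
  | nil => simp [cpySetOrder]
  | cons x xs => simpa using cpySetOrder_ne_nil x xs

lemma pvInterList_ne_nil_iff (ca cb : List Int) :
    pvInterList ca cb ≠ [] ↔ ∃ x, x ∈ ca ∧ x ∈ cb := by
  unfold pvInterList
  rw [Ne, cpySetOrder_eq_nil_iff, List.eq_nil_iff_forall_not_mem]
  constructor
  · intro h
    by_contra hc
    push Not at hc
    apply h
    intro y hy
    rw [PySem.Set.mem_inter, PySem.Set.mem_ofList] at hy
    exact hc y hy.2 hy.1
  · rintro ⟨x, hxa, hxb⟩ h
    exact h x (by rw [PySem.Set.mem_inter, PySem.Set.mem_ofList]; exact ⟨hxb, hxa⟩)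

-- ---- the inverted index: index.getD x [] = ascending indices of the b-components containing x ----
lemma pvPairs_filter_map (l : List Int) (j : Int) (x : Int) (hl : l.Nodup) :
    ((l.map (fun y => (y, j))).filter (fun p => p.1 == x)).map (fun p => p.2)
      = if x ∈ l then [j] else [] := by
  rw [List.filter_map, List.map_map]
  have hf : List.filter ((fun (p : Int × Int) => p.1 == x) ∘ (fun y => (y, j))) l
      = List.filter (· == x) l := rfl
  rw [hf, List.filter_beq, List.map_replicate]
  by_cases hx : x ∈ l
  · rw [if_pos hx]
    have hle : l.count x ≤ 1 := by
      rw [List.nodup_iff_count_le_one] at hl; exact hl x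
    have hpos := List.count_pos_iff.mpr hx
    have h1 : l.count x = 1 := by omega
    rw [h1]; rfl
  · rw [if_neg hx, List.count_eq_zero_of_not_mem hx, List.replicate_zero]

lemma pvFlatMap_if_singleton {α β : Type} (l : List α) (p : α → Prop) [DecidablePred p] (f : α → β) :
    (l.flatMap (fun e => if p e then [f e] else [])) = (l.filter (fun e => decide (p e))).map f := by
  induction l with
  | nil => simp
  | cons e es ih =>
    by_cases hp : p e
    · simp [hp, ih]
    · simp [hp, ih]

lemma pvIndex_getD (bs : List (List Int)) (x : Int) :
    ((PySem.List.enumerate bs).foldl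
        (fun d jcb => (PySem.Set.ofList jcb.2).foldl (fun d x => d.modify x [] (· ++ [jcb.1])) d)
        PySem.Dict.empty).getD x []
      = ((PySem.List.enumerate bs).filter (fun e => decide (x ∈ e.2))).map (fun e => e.1) := by
  have h1 : ∀ (d : PySem.Dict Int (List Int)) (e : Int × List Int),
      (PySem.Set.ofList e.2).foldl (fun d x => d.modify x [] (· ++ [e.1])) d
        = ((PySem.Set.ofList e.2).map (fun x => (x, e.1))).foldl (fun d p => d.modify p.1 [] (· ++ [p.2])) d := by
    intro d e; rw [List.foldl_map]
  conv_lhs => rw [funext (fun d => funext (fun e => h1 d e))]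
  rw [← List.foldl_flatMap, PySem.Dict.getD_foldl_modify_append]
  have hemp : (PySem.Dict.empty : PySem.Dict Int (List Int)).getD x [] = [] := rfl
  rw [hemp, List.nil_append, List.filter_flatMap, List.map_flatMap]
  have h2 : (fun e : Int × List Int =>
        (((PySem.Set.ofList e.2).map (fun y => (y, e.1))).filter (fun p => p.1 == x)).map (fun p => p.2))
      = fun e : Int × List Int => if x ∈ e.2 then [e.1] else [] := by
    funext e
    rw [pvPairs_filter_map _ _ _ (PySem.Set.nodup_ofList e.2)]
    by_cases hx : x ∈ e.2
    · rw [if_pos ((PySem.Set.mem_ofList e.2 x).mpr hx), if_pos hx]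
    · rw [if_neg (fun h => hx ((PySem.Set.mem_ofList e.2 x).mp h)), if_neg hx]
  rw [h2, pvFlatMap_if_singleton (p := fun e : Int × List Int => x ∈ e.2)]

-- ---- the hit set ----
lemma pvMem_foldl_update (l : List Int) (f : Int → List Int) (h0 : PySem.Set Int) (j : Int) :
    j ∈ l.foldl (fun h x => PySem.Set.update h (f x)) h0 ↔ j ∈ h0 ∨ ∃ x ∈ l, j ∈ f x := by
  induction l generalizing h0 with
  | nil => simp
  | cons y ys ih =>
    rw [List.foldl_cons, ih]
    rw [PySem.Set.mem_update]
    constructor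
    · rintro (( h | h) | ⟨x, hx, hj⟩)
      · exact Or.inl h
      · exact Or.inr ⟨y, List.mem_cons_self, h⟩
      · exact Or.inr ⟨x, List.mem_cons_of_mem _ hx, hj⟩
    · rintro (h | ⟨x, hx, hj⟩)
      · exact Or.inl (Or.inl h)
      · rcases List.mem_cons.mp hx with rfl | hx
        · exact Or.inl (Or.inr hj)
        · exact Or.inr ⟨x, hx, hj⟩

lemma pvNodup_foldl_update (l : List Int) (f : Int → List Int) (h0 : PySem.Set Int)
    (h : h0.Nodup) : (l.foldl (fun h x => PySem.Set.update h (f x)) h0).Nodup := by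
  induction l generalizing h0 with
  | nil => exact h
  | cons y ys ih => exact ih _ (PySem.Set.nodup_update _ _ h)

-- ---- enumerate facts ----
lemma pvMem_enumerate (bs : List (List Int)) (e : Int × List Int)
    (he : e ∈ PySem.List.enumerate bs) :
    PySem.List.pyGetD bs e.1 [] = e.2 := by
  obtain ⟨k, hk, he⟩ := List.mem_iff_getElem.mp he
  have hlen : k < bs.length := by
    simpa [PySem.List.length_enumerate] using hk
  rw [PySem.List.getElem_enumerate] at he
  have h1 : e.1 = (k : Int) := by rw [← he]; simp
  have h2 : e.2 = bs[k] := by rw [← he]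
  rw [h1, h2, PySem.List.pyGetD_natCast, List.getD_eq_getElem _ _ hlen]

lemma pvEnum_filter_map {β : Type} (bs : List (List Int)) (p : List Int → Bool) (F : List Int → β) :
    ∀ s : Int, (((PySem.List.enumerate bs s).filter (fun e => p e.2)).map (fun e => F e.2))
      = (bs.filter p).map F := by
  induction bs with
  | nil => intro s; simp [PySem.List.enumerate]
  | cons c cs ih =>
    intro s
    rw [PySem.List.enumerate_cons, List.filter_cons, List.filter_cons]
    by_cases hp : p c
    · simp only [hp, if_pos]
      rw [List.map_cons, List.map_cons, ih (s + 1)]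
    · simp only [hp]
      rw [if_neg (by simp), if_neg (by simp), ih (s + 1)]

-- ---- sorted hit = ascending candidate rows ----
lemma pvSorted_hit (ca : List Int) (bs : List (List Int)) :
    PySem.List.sorted
      ((PySem.Set.ofList ca).foldl
        (fun h x => PySem.Set.update h
          (((PySem.List.enumerate bs).foldl
              (fun d jcb => (PySem.Set.ofList jcb.2).foldl (fun d x => d.modify x [] (· ++ [jcb.1])) d)
              PySem.Dict.empty).getD x []))
        PySem.Set.empty) (fun j => j) false
    = ((PySem.List.enumerate bs).filter (fun e => decide (∃ x, x ∈ ca ∧ x ∈ e.2))).map (fun e => e.1) := by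
  have hidx : (fun (h : PySem.Set Int) (x : Int) => PySem.Set.update h
        (((PySem.List.enumerate bs).foldl
            (fun d jcb => (PySem.Set.ofList jcb.2).foldl (fun d x => d.modify x [] (· ++ [jcb.1])) d)
            PySem.Dict.empty).getD x []))
      = fun (h : PySem.Set Int) (x : Int) => PySem.Set.update h
          (((PySem.List.enumerate bs).filter (fun e => decide (x ∈ e.2))).map (fun e => e.1)) := by
    funext h x; rw [pvIndex_getD]
  rw [hidx]
  set asc := ((PySem.List.enumerate bs).filter (fun e => decide (∃ x, x ∈ ca ∧ x ∈ e.2))).map (fun e => e.1) with hasc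
  have hsub : asc.Sublist ((PySem.List.enumerate bs).map (fun e => e.1)) :=
    List.Sublist.map _ List.filter_sublist
  have hfst : (PySem.List.enumerate bs).map (fun e => e.1)
      = PySem.List.pyRange 0 (0 + bs.length) 1 := PySem.List.map_fst_enumerate bs 0
  have hlt : asc.Pairwise (· < ·) := by
    refine List.Pairwise.sublist hsub ?_
    rw [hfst]; exact PySem.List.pairwise_lt_pyRange_one 0 (0 + bs.length)
  have hascnd : asc.Nodup := hlt.imp (fun h => ne_of_lt h)
  have hhitnd : ((PySem.Set.ofList ca).foldl
      (fun h x => PySem.Set.update h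
        (((PySem.List.enumerate bs).filter (fun e => decide (x ∈ e.2))).map (fun e => e.1)))
      PySem.Set.empty).Nodup :=
    pvNodup_foldl_update _ _ _ (by simp [PySem.Set.empty])
  have hperm : ((PySem.Set.ofList ca).foldl
      (fun h x => PySem.Set.update h
        (((PySem.List.enumerate bs).filter (fun e => decide (x ∈ e.2))).map (fun e => e.1)))
      PySem.Set.empty).Perm asc := by
    rw [List.perm_ext_iff_of_nodup hhitnd hascnd]
    intro j
    rw [pvMem_foldl_update]
    simp only [PySem.Set.empty, List.not_mem_nil, false_or]
    rw [hasc]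
    constructor
    · rintro ⟨x, hxca, hj⟩
      rw [List.mem_map] at hj
      obtain ⟨e, he, rfl⟩ := hj
      rw [List.mem_filter] at he
      refine List.mem_map.mpr ⟨e, List.mem_filter.mpr ⟨he.1, ?_⟩, rfl⟩
      have hx2 := of_decide_eq_true he.2
      exact decide_eq_true ⟨x, (PySem.Set.mem_ofList ca x).mp hxca, hx2⟩
    · intro hj
      rw [List.mem_map] at hj
      obtain ⟨e, he, rfl⟩ := hj
      rw [List.mem_filter] at he
      obtain ⟨x, hxca, hx2⟩ := of_decide_eq_true he.2
      exact ⟨x, (PySem.Set.mem_ofList ca x).mpr hxca,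
        List.mem_map.mpr ⟨e, List.mem_filter.mpr ⟨he.1, decide_eq_true hx2⟩, rfl⟩⟩
  calc PySem.List.sorted ((PySem.Set.ofList ca).foldl
        (fun h x => PySem.Set.update h
          (((PySem.List.enumerate bs).filter (fun e => decide (x ∈ e.2))).map (fun e => e.1)))
        PySem.Set.empty) (fun j => j) false
      = PySem.List.sorted asc (fun j => j) false :=
        PySem.List.sorted_eq_sorted_of_perm _ _ _ (fun a b h => h) hperm
    _ = asc := PySem.List.sorted_eq_self_of_pairwise _ _ (hlt.imp (fun h => le_of_lt h))

-- ---- the two inner loops agree ----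
lemma pvInner (ca : List Int) (bs : List (List Int)) (acc : List (List Int × List Int × List Int)) :
    (((PySem.List.enumerate bs).filter (fun e => decide (∃ x, x ∈ ca ∧ x ∈ e.2))).map (fun e => e.1)).foldl
        (fun acc j => acc ++ [(ca, PySem.List.pyGetD bs j [], pvInterList ca (PySem.List.pyGetD bs j []))]) acc
      = bs.foldl (fun acc cb =>
          if pvInterList ca cb ≠ [] then acc ++ [(ca, cb, pvInterList ca cb)] else acc) acc := by
  rw [PySem.List.foldl_append_singleton_eq_map]
  have hdec : (fun acc cb =>
        if pvInterList ca cb ≠ [] then acc ++ [(ca, cb, pvInterList ca cb)] else acc)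
      = fun (acc : List (List Int × List Int × List Int)) cb =>
        if (decide (pvInterList ca cb ≠ [])) = true then acc ++ [(ca, cb, pvInterList ca cb)] else acc := by
    funext acc cb
    simp only [decide_eq_true_eq]
  rw [hdec, PySem.List.foldl_append_if]
  congr 1
  rw [List.map_map]
  have hmc : ∀ e ∈ (PySem.List.enumerate bs).filter (fun e => decide (∃ x, x ∈ ca ∧ x ∈ e.2)),
      ((fun j => (ca, PySem.List.pyGetD bs j [], pvInterList ca (PySem.List.pyGetD bs j []))) ∘ (fun e => e.1)) e
        = (fun e : Int × List Int => (ca, e.2, pvInterList ca e.2)) e := by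
    intro e he
    have := pvMem_enumerate bs e (List.mem_of_mem_filter he)
    rw [Function.comp_apply, this]
  rw [List.map_congr_left hmc,
    pvEnum_filter_map bs (fun cb => decide (∃ x, x ∈ ca ∧ x ∈ cb))
      (fun cb => (ca, cb, pvInterList ca cb)) 0]
  apply congrArg
  apply List.filter_congr
  intro cb _
  exact decide_eq_decide.mpr (pvInterList_ne_nil_iff ca cb).symm

lemma pvMain (components_a components_b : List (List Int)) :
    find_component_intersections components_a components_b
      = find_component_intersections_alt components_a components_b := by
  unfold find_component_intersections find_component_intersections_alt
  rw [bInterList_eq]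
  have hfun : (fun (acc : List (List Int × List Int × List Int)) (ca : List Int) =>
        components_b.foldl (fun acc cb =>
          if pvInterList ca cb ≠ [] then acc ++ [(ca, cb, pvInterList ca cb)] else acc) acc)
      = fun acc ca =>
        (PySem.List.sorted
          ((PySem.Set.ofList ca).foldl
            (fun h x => PySem.Set.update h
              (((PySem.List.enumerate components_b).foldl
                  (fun d jcb => (PySem.Set.ofList jcb.2).foldl
                    (fun d x => d.modify x [] (· ++ [jcb.1])) d)
                  PySem.Dict.empty).getD x []))
            PySem.Set.empty) (fun j => j) false).foldl
          (fun acc j => acc ++ [(ca, PySem.List.pyGetD components_b j [],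
            pvInterList ca (PySem.List.pyGetD components_b j []))]) acc := by
    funext acc ca
    rw [pvSorted_hit]
    exact (pvInner ca components_b acc).symm
  exact congrFun (congrFun (congrArg List.foldl hfun) []) components_a

-- ===== VERDICT (by name: the statement is the Claim_ definition above) =====
theorem find_component_intersections_spec : Claim_equal_find_component_intersections := by
  intro components_a components_b _
  exact pvMain components_a components_b
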